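-- pv_equiv track=rewrite | github.com/dgilbert418/cant_stop | BotLib.py | roll_combos
-- ===== SOURCE A (Python) =====
-- def roll_combos(dice):
--     combos = set()
--     for i in range(len(dice)):
--         temp = list(dice)
--         lane_1 = temp.pop(i) + temp.pop(0)
--         lane_2 = sum(temp)
--         valid_lanes = tuple(sorted([lane_1, lane_2]))
--         if valid_lanes:
--             combos.add(valid_lanes)
--     return frozenset(combos)
-- ===== SOURCE B (Python) =====
-- def roll_combos(dice):
--     # Pair the first die with each other die; the other lane is the rest of the total.
--     total = sum(dice)
--     combos = set()
--     for i in range(1, len(dice)):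
--         lane_1 = dice[0] + dice[i]
--         combos.add(tuple(sorted((lane_1, total - lane_1))))
--     return frozenset(combos)
-- ===== Notes on version B (the rewrite author's own statement) =====
-- stated objective: faster
-- what changed: B precomputes the total once and pairs dice[0] with each other die directly (lane_2 = total - lane_1), eliminating A's per-iteration list copy, double pop and summing of the remainder, and the always-true truthiness guard.
-- outside the precondition, e.g. on roll_combos([0]): A raises IndexError, B returns set()
import Mathlib
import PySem

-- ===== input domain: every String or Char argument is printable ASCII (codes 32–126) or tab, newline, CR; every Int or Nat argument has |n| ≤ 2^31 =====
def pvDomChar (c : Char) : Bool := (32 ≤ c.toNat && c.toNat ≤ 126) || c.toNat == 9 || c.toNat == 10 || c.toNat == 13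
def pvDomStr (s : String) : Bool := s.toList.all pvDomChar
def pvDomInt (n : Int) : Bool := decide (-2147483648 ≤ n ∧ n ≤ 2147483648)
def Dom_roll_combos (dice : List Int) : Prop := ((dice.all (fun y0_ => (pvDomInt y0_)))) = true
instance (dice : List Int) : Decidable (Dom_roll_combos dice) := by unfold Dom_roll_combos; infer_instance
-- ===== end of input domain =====

-- B computes each pairing directly from dice[0], dice[i] and the precomputed total, instead of
-- copying and double-popping the list; simpler, same result (return value only — neither mutates).

-- tuple(sorted([a, b])) on a two-element list, as a pair (the wildcard arm is unreachable:
-- sorted preserves length).  Shared by both ports.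
def pvSorted2 (a b : Int) : Int × Int :=
  match PySem.List.sorted [a, b] (fun x => x) false with
  | [x, y] => (x, y)
  | _ => (a, b)

-- ===== PORT A =====
-- the body of A's for-loop (combos is the running set, i the loop index)
def pvStepA (dice : List Int) (combos : List (Int × Int)) (i : Int) : List (Int × Int) :=
  match PySem.List.pop? dice i with
  | none => combos                       -- IndexError (pop from empty copy): excluded by Pre_
  | some (v1, t1) =>
    match PySem.List.pop? t1 0 with
    | none => combos                     -- IndexError on a 1-element dice: excluded by Pre_
    | some (v2, t2) =>
      -- Python's 'if valid_lanes:' is always true (a 2-tuple is truthy)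
      PySem.Set.add combos (pvSorted2 (v1 + v2) t2.sum)

def roll_combos (dice : List Int) : List (Int × Int) :=
  (PySem.List.pyRange 0 (dice.length : Int) 1).foldl (pvStepA dice) []

-- ===== PORT B =====
-- the body of B's for-loop
def pvStepB (dice : List Int) (total : Int) (combos : List (Int × Int)) (i : Int) : List (Int × Int) :=
  match PySem.List.pyGet? dice 0, PySem.List.pyGet? dice i with
  | some d0, some di =>
    let lane_1 := d0 + di
    PySem.Set.add combos (pvSorted2 lane_1 (total - lane_1))
  | _, _ => combos                       -- unreachable: 0 ≤ 0, i < len inside the loop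

def roll_combos_alt (dice : List Int) : List (Int × Int) :=
  let total := dice.sum
  (PySem.List.pyRange 1 (dice.length : Int) 1).foldl (pvStepB dice total) []

-- ===== PRECONDITION & SPEC =====
-- A raises IndexError on a one-element list (the second pop on an emptied list); only those inputs are excluded.
def Pre_roll_combos (dice : List Int) : Prop := dice.length ≠ 1
instance (dice : List Int) : Decidable (Pre_roll_combos dice) := by unfold Pre_roll_combos; infer_instance
def pvWitness_roll_combos : List Int := ([1, 2, 3, 4])

def Spec_roll_combos (dice : List Int) (out : List (Int × Int)) : Prop := out = roll_combos_alt dice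
instance (dice : List Int) (out : List (Int × Int)) : Decidable (Spec_roll_combos dice out) := by unfold Spec_roll_combos; infer_instance

-- ===== CLAIM (what is proved, stated in full; the proofs are below) =====
def Claim_equal_roll_combos : Prop := ∀ (dice : List Int), Dom_roll_combos dice → Pre_roll_combos dice → Spec_roll_combos dice (roll_combos dice)

-- ===== LEMMAS AND PROOFS =====

theorem pv_sum_eraseIdx (xs : List Int) (k : Nat) (h : k < xs.length) :
    (xs.eraseIdx k).sum = xs.sum - xs[k] := by
  induction xs generalizing k with
  | nil => simp at h
  | cons x t ih =>
    cases k with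
    | zero => simp
    | succ k =>
      simp only [List.eraseIdx_cons_succ, List.sum_cons, List.getElem_cons_succ]
      rw [ih k (by simpa using h)]
      ring

-- the loop bodies agree on every index 1 ≤ i < len
theorem pv_step_eq (d0 d1 : Int) (rest : List Int) (i : Int)
    (h1 : 1 ≤ i) (h2 : i < ((d0 :: d1 :: rest).length : Int)) (s : List (Int × Int)) :
    pvStepA (d0 :: d1 :: rest) s i = pvStepB (d0 :: d1 :: rest) (d0 :: d1 :: rest).sum s i := by
  obtain ⟨k, rfl⟩ : ∃ k : Nat, i = (k : Int) := ⟨i.toNat, (Int.toNat_of_nonneg (by omega)).symm⟩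
  have hklen : k < (d0 :: d1 :: rest).length := by exact_mod_cast h2
  obtain ⟨k', rfl⟩ : ∃ k', k = k' + 1 := ⟨k - 1, by omega⟩
  have hklen' : k' < (d1 :: rest).length := by
    simp only [List.length_cons] at hklen ⊢; omega
  unfold pvStepA pvStepB
  rw [PySem.List.pop?_natCast _ _ hklen]
  have hget0 : PySem.List.pyGet? (d0 :: d1 :: rest) 0 = some d0 := by
    simpa using PySem.List.pyGet?_natCast (d0 :: d1 :: rest) 0
  rw [hget0, PySem.List.pyGet?_natCast (d0 :: d1 :: rest) (k' + 1)]
  simp only [List.getElem?_eq_getElem hklen, List.eraseIdx_cons_succ,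
    PySem.List.pop?_zero_cons, List.getElem_cons_succ]
  rw [pv_sum_eraseIdx (d1 :: rest) k' hklen']
  congr 2
  · ring
  · simp only [List.sum_cons]; ring

theorem roll_combos_eq (dice : List Int) (h : dice.length ≠ 1) :
    roll_combos dice = roll_combos_alt dice := by
  match dice with
  | [] => rfl
  | [d] => exact absurd rfl h
  | d0 :: d1 :: rest =>
    unfold roll_combos roll_combos_alt
    have hlen : (2 : Int) ≤ ((d0 :: d1 :: rest).length : Int) := by
      simp only [List.length_cons]; push_cast; omega
    rw [PySem.List.pyRange_one_cons (a := 0) (by omega),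
        show (0 : Int) + 1 = 1 from rfl,
        PySem.List.pyRange_one_cons (a := 1) (by omega),
        show (1 : Int) + 1 = 2 from rfl]
    simp only [List.foldl_cons]
    -- A's remaining iterations (i = 1 … len-1) run the same step as B's
    rw [PySem.List.foldl_congr_mem (PySem.List.pyRange 2 ((d0 :: d1 :: rest).length : Int) 1)
          (pvStepA (d0 :: d1 :: rest)) (pvStepB (d0 :: d1 :: rest) (d0 :: d1 :: rest).sum) _
          (fun acc i hi => by
            have := (PySem.List.mem_pyRange_one).1 hi
            exact pv_step_eq d0 d1 rest i (by omega) (by omega) acc)]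
    -- and the initial states agree: A's i = 0 and i = 1 both add the pair B's i = 1 adds
    congr 1
    rw [pv_step_eq d0 d1 rest 1 (by omega) (by omega)]
    -- A's i = 0 step and both i = 1 steps all add the same pair
    have hget0 : PySem.List.pyGet? (d0 :: d1 :: rest) 0 = some d0 := by
      simpa using PySem.List.pyGet?_natCast (d0 :: d1 :: rest) 0
    have hget1 : PySem.List.pyGet? (d0 :: d1 :: rest) 1 = some d1 := by
      simpa using PySem.List.pyGet?_natCast (d0 :: d1 :: rest) 1
    have hA0 : pvStepA (d0 :: d1 :: rest) [] 0 = [pvSorted2 (d0 + d1) rest.sum] := by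
      unfold pvStepA
      simp [PySem.List.pop?_zero_cons, PySem.Set.add, PySem.Set.contains]
    have hB : ∀ s, pvStepB (d0 :: d1 :: rest) (d0 :: d1 :: rest).sum s 1
        = PySem.Set.add s (pvSorted2 (d0 + d1) rest.sum) := by
      intro s
      unfold pvStepB
      rw [hget0, hget1]
      show PySem.Set.add s (pvSorted2 (d0 + d1) ((d0 :: d1 :: rest).sum - (d0 + d1))) = _
      congr 2
      simp only [List.sum_cons]; ring
    rw [hA0, hB, hB]
    -- re-adding an element already in the set is a no-op
    simp [PySem.Set.add, PySem.Set.contains]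

-- ===== VERDICT (by name: the statement is the Claim_ definition above) =====
theorem roll_combos_spec : Claim_equal_roll_combos := by
  intro dice _ hpre
  unfold Spec_roll_combos
  exact roll_combos_eq dice hpre
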